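-- pv_equiv track=rewrite | github.com/SimForgeinc/carla-scenario-orchestrator | orchestrator/generated_map.py | _feature_counts
-- ===== SOURCE A (Python) =====
-- from typing import Any
--
-- def _feature_counts(roads: list[dict[str, Any]]) -> dict[str, int]:
--     counts = {
--         "intersection": 0,
--         "parking": 0,
--         "single_lane_road": 0,
--         "single_lane_each_way": 0,
--         "two_lane_one_way": 0,
--         "two_lane_each_way": 0,
--         "crosswalk": 0,
--         "stop_control": 0,
--     }
--     for road in roads:
--         for tag in road["tags"]:
--             if tag in counts:
--                 counts[tag] += 1
--     return counts
-- ===== SOURCE B (Python) =====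
-- def _feature_counts(roads):
--     keys = (
--         "intersection",
--         "parking",
--         "single_lane_road",
--         "single_lane_each_way",
--         "two_lane_one_way",
--         "two_lane_each_way",
--         "crosswalk",
--         "stop_control",
--     )
--
--     def go(rs):
--         if len(rs) == 0:
--             return [0] * len(keys)
--         if len(rs) == 1:
--             tags = rs[0]["tags"]
--             return [sum(1 for t in tags if t == k) for k in keys]
--         mid = len(rs) // 2
--         left, right = go(rs[:mid]), go(rs[mid:])
--         return [a + b for a, b in zip(left, right)]
--
--     return dict(zip(keys, go(roads)))
-- ===== Notes on version B (the rewrite author's own statement) =====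
-- stated objective: alternative
-- what changed: Replaces the single dict-threading nested loop by a divide-and-conquer recursion: split the road list in half, compute a per-key count vector for each half (a single road's vector by direct equality-counting), merge halves by pointwise vector addition, and finally zip the fixed key tuple with the resulting vector into the output dict.
import Mathlib
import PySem

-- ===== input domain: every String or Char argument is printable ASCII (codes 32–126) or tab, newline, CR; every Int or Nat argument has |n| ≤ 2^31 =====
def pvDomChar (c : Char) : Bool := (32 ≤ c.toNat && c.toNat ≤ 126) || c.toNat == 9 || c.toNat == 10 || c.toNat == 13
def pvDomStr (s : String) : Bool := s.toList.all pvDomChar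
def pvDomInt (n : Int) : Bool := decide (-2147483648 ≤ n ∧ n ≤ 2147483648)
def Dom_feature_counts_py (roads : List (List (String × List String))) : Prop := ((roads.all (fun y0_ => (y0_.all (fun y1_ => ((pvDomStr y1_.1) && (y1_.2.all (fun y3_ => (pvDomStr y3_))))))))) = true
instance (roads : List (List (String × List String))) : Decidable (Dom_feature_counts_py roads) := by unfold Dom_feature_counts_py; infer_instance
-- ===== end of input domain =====

-- B replaces A's dict-threading nested loop by divide-and-conquer: split the road list in
-- half, compute a per-key count vector for each half, merge by pointwise addition, and zip
-- the fixed key list with the final vector; same return value wherever A returns (Pre_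
-- excludes roads without a "tags" key, where both raise KeyError).

-- road["tags"] : first-match association-list lookup (exact for Python dicts, which have unique keys)
def pvTagsOf (road : List (String × List String)) : List String :=
  ((road.find? (fun p => p.1 == "tags")).map (·.2)).getD []

-- ===== PORT A =====
def feature_counts_py (roads : List (List (String × List String))) : List (String × Int) :=
  let counts0 : PySem.Dict String Int := PySem.Dict.ofList
    [("intersection", 0), ("parking", 0), ("single_lane_road", 0), ("single_lane_each_way", 0),
     ("two_lane_one_way", 0), ("two_lane_each_way", 0), ("crosswalk", 0), ("stop_control", 0)]
  let counts := roads.foldl (fun counts road =>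
    (pvTagsOf road).foldl (fun counts tag =>
      if counts.contains tag then counts.modify tag 0 (· + 1) else counts) counts) counts0
  counts.items

-- ===== PORT B =====
-- the fixed key tuple of Source B
def pvKeys : List String :=
  ["intersection", "parking", "single_lane_road", "single_lane_each_way",
   "two_lane_one_way", "two_lane_each_way", "crosswalk", "stop_control"]

-- Source B's recursive helper `go`: rs[:mid]/rs[mid:] with 0 ≤ mid ≤ len are exactly take/drop;
-- `sum(1 for t in tags if t == k)` is the length of the filter.
def pvGo (rs : List (List (String × List String))) : List Int :=
  if rs.length = 0 then List.replicate pvKeys.length 0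
  else if rs.length = 1 then
    let tags := pvTagsOf (rs.headD [])
    pvKeys.map (fun k => (((tags.filter (fun t => t == k)).length : Nat) : Int))
  else
    let mid := rs.length / 2
    let left := pvGo (rs.take mid)
    let right := pvGo (rs.drop mid)
    (left.zip right).map (fun p => p.1 + p.2)
termination_by rs.length
decreasing_by
  · simp only [List.length_take]; omega
  · simp only [List.length_drop]; omega

-- dict(zip(keys, go(roads))): keys are pairwise distinct, so insertion order = the zip itself
def feature_counts_py_alt (roads : List (List (String × List String))) : List (String × Int) :=
  pvKeys.zip (pvGo roads)

-- ===== PRECONDITION & SPEC =====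
-- Pre_ excludes only roads missing a "tags" key, on which A (and B) raise KeyError.
def Pre_feature_counts_py (roads : List (List (String × List String))) : Prop :=
  (roads.all (fun road => road.any (fun p => p.1 == "tags"))) = true
instance (roads : List (List (String × List String))) : Decidable (Pre_feature_counts_py roads) := by
  unfold Pre_feature_counts_py; infer_instance
def pvWitness_feature_counts_py : (List (List (String × List String))) :=
  [[("tags", ["parking", "crosswalk", "parking"])], [("tags", [])]]

def Spec_feature_counts_py (roads : List (List (String × List String))) (out : List (String × Int)) : Prop := out = feature_counts_py_alt roads
instance (roads : List (List (String × List String))) (out : List (String × Int)) : Decidable (Spec_feature_counts_py roads out) := by unfold Spec_feature_counts_py; infer_instance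

-- ===== CLAIM (what is proved, stated in full; the proofs are below) =====
def Claim_equal_feature_counts_py : Prop := ∀ (roads : List (List (String × List String))), Dom_feature_counts_py roads → Pre_feature_counts_py roads → Spec_feature_counts_py roads (feature_counts_py roads)

-- ===== LEMMAS AND PROOFS =====

-- A-side: the inner loop body of A's port
def pvStep (d : PySem.Dict String Int) (tag : String) : PySem.Dict String Int :=
  if d.contains tag then d.modify tag 0 (· + 1) else d

theorem pvStep_keys (d : PySem.Dict String Int) (t : String) : (pvStep d t).keys = d.keys := by
  unfold pvStep; split
  · rw [PySem.Dict.keys_modify]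
    exact PySem.Dict.keys_insert_of_contains d _ (by assumption)
  · rfl

theorem pvFold_keys (l : List String) (d : PySem.Dict String Int) :
    (l.foldl pvStep d).keys = d.keys := by
  induction l generalizing d with
  | nil => rfl
  | cons t l ih => simp [List.foldl_cons, ih, pvStep_keys]

theorem pvContains_eq (d : PySem.Dict String Int) (k : String) :
    d.contains k = d.keys.contains k := by
  simp [PySem.Dict.contains, PySem.Dict.keys, List.any_eq]

theorem pvFold_getD (l : List String) (d : PySem.Dict String Int) (k : String)
    (hk : d.contains k = true) :
    (l.foldl pvStep d).getD k 0 = d.getD k 0 + l.count k := by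
  induction l generalizing d with
  | nil => simp
  | cons t l ih =>
    have hck : (pvStep d t).contains k = true := by
      rw [pvContains_eq, pvStep_keys, ← pvContains_eq]; exact hk
    rw [List.foldl_cons, ih _ hck]
    by_cases ht : t = k
    · subst ht
      rw [pvStep, if_pos hk, PySem.Dict.getD_modify_self]
      simp
      ring
    · have : (pvStep d t).getD k 0 = d.getD k 0 := by
        unfold pvStep; split
        · exact PySem.Dict.getD_modify_of_ne _ _ _ (fun h => ht h.symm)
        · rfl
      rw [this]
      simp [ht]

theorem pvOuter_getD (roads : List (List (String × List String))) (d : PySem.Dict String Int)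
    (k : String) (hk : d.contains k = true) :
    (roads.foldl (fun c road => (pvTagsOf road).foldl pvStep c) d).getD k 0
      = d.getD k 0 + (roads.flatMap (fun road => pvTagsOf road)).count k := by
  induction roads generalizing d with
  | nil => simp
  | cons r rs ih =>
    have hck : ((pvTagsOf r).foldl pvStep d).contains k = true := by
      rw [pvContains_eq, pvFold_keys, ← pvContains_eq]; exact hk
    rw [List.foldl_cons, ih _ hck, pvFold_getD _ _ _ hk]
    simp [List.count_append]
    ring

theorem pvOuter_keys (roads : List (List (String × List String))) (d : PySem.Dict String Int) :
    (roads.foldl (fun c road => (pvTagsOf road).foldl pvStep c) d).keys = d.keys := by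
  induction roads generalizing d with
  | nil => rfl
  | cons r rs ih => rw [List.foldl_cons, ih, pvFold_keys]

-- B-side: zipping a list with a map of itself
theorem pvZipSelf {α β : Type} (l : List α) (g : α → β) :
    l.zip (l.map g) = l.map (fun a => (a, g a)) := by
  induction l with
  | nil => rfl
  | cons a l ih => simp [ih]

-- the divide-and-conquer recursion computes, per key, the tag count over all roads
theorem pvGo_eq (rs : List (List (String × List String))) :
    pvGo rs = pvKeys.map (fun k => (((rs.flatMap (fun road => pvTagsOf road)).count k : Nat) : Int)) := by
  induction rs using pvGo.induct with
  | case1 rs h0 =>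
    have : rs = [] := List.eq_nil_of_length_eq_zero h0
    subst this
    rw [pvGo]; decide
  | case2 rs h0 h1 =>
    obtain ⟨r, hr⟩ := List.length_eq_one_iff.mp h1
    subst hr
    rw [pvGo]
    simp [List.count, List.countP_eq_length_filter]
  | case3 rs h0 h1 mid ih1 ih2 =>
    rw [pvGo]
    simp only [if_neg h0, if_neg h1]
    rw [ih1, ih2, List.zip_map', List.map_map]
    apply List.map_congr_left
    intro a _
    conv_rhs => rw [← List.take_append_drop mid rs]
    rw [List.flatMap_append, List.count_append]
    simp [Function.comp]

-- ===== VERDICT (by name: the statement is the Claim_ definition above) =====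
theorem feature_counts_py_spec : Claim_equal_feature_counts_py := by
  intro roads _ _
  unfold Spec_feature_counts_py feature_counts_py feature_counts_py_alt
  rw [pvGo_eq, pvZipSelf]
  set counts0 : PySem.Dict String Int := PySem.Dict.ofList
    [("intersection", 0), ("parking", 0), ("single_lane_road", 0), ("single_lane_each_way", 0),
     ("two_lane_one_way", 0), ("two_lane_each_way", 0), ("crosswalk", 0), ("stop_control", 0)]
    with hc0
  have hstep : (fun (counts : PySem.Dict String Int) tag =>
      if counts.contains tag then counts.modify tag 0 (· + 1) else counts) = pvStep := rfl
  simp only [hstep]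
  set d := roads.foldl (fun c road => (pvTagsOf road).foldl pvStep c) counts0 with hd
  have hkeys : d.keys = counts0.keys := by
    rw [hd]; exact pvOuter_keys roads counts0
  have hnodup : d.keys.Nodup := by rw [hkeys, hc0]; decide
  have hitems := PySem.Dict.items_eq_map_keys d hnodup 0
  rw [hitems, hkeys]
  have hk0 : counts0.keys = pvKeys := by rw [hc0]; decide
  rw [hk0]
  apply List.map_congr_left
  intro k hk
  have hcont : counts0.contains k = true := by
    rw [pvContains_eq, hk0]; simpa [pvKeys] using hk
  have hz : counts0.getD k 0 = 0 := by
    fin_cases hk <;> (rw [hc0]; decide)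
  rw [hd, pvOuter_getD roads counts0 k hcont, hz, zero_add]
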